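-- pv_equiv track=rewrite | github.com/nishi10mo/AtCoder | practice/AtCoder Beginner Contest/ABC085/C.py | Otoshidama
-- ===== SOURCE A (Python) =====
-- def Otoshidama(n, y):
--   l = y//10000
--   for i in range(l+1):
--     m = n - i
--     for j in range(m+1):
--       s = n - i - j
--       total = 10000*i + 5000*j + 1000*s
--       if total == y:
--         return [i, j, s]
--   return [-1, -1, -1]
-- ===== SOURCE B (Python) =====
-- def Otoshidama(n, y):
--     # For each candidate count i of 10000-yen bills, the remaining equation
--     # 5000*j + 1000*(n-i-j) = y - 10000*i has at most one solution j, solved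
--     # algebraically instead of scanned: 4000*j = y - 9000*i - 1000*n.
--     top = min(y // 10000, n)
--     for i in range(top + 1):
--         r = y - 9000 * i - 1000 * n
--         if r >= 0 and r % 4000 == 0 and r // 4000 <= n - i:
--             j = r // 4000
--             return [i, j, n - i - j]
--     return [-1, -1, -1]
-- ===== Notes on version B (the rewrite author's own statement) =====
-- stated objective: faster
-- what changed: B removes A's inner scan over j by solving 4000*j = y - 9000*i - 1000*n algebraically for each i (with integrality and range checks), turning the nested O(n^2) loop into a single O(n) loop.
import Mathlib
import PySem

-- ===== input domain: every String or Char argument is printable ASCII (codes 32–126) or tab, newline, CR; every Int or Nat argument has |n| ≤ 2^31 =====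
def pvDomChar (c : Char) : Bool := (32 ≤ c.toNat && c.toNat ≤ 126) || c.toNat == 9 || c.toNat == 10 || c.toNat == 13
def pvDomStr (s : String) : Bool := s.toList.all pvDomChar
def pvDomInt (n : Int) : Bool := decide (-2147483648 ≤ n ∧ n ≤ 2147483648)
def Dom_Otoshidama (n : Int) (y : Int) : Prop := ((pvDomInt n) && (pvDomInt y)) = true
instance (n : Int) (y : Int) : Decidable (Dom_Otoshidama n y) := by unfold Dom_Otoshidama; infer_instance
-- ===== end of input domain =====

-- B replaces A's inner scan over j by solving the linear equation for j algebraically,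
-- one O(1) check per i instead of an O(n) scan (objective: faster, O(n^2) -> O(n)).

-- ===== PORT A =====
-- inner 'for j in range(m+1)' loop with early return
def pvInnerA (n y i : Int) : List Int → Option (List Int)
  | [] => none
  | j :: js =>
    let s := n - i - j
    let total := 10000 * i + 5000 * j + 1000 * s
    if total = y then some [i, j, s] else pvInnerA n y i js

-- outer 'for i in range(l+1)' loop with early return
def pvOuterA (n y : Int) : List Int → List Int
  | [] => [-1, -1, -1]
  | i :: is =>
    let m := n - i
    match pvInnerA n y i (PySem.List.pyRange 0 (m + 1) 1) with
    | some res => res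
    | none => pvOuterA n y is

def Otoshidama (n : Int) (y : Int) : List Int :=
  let l := PySem.Int.floordiv y 10000
  pvOuterA n y (PySem.List.pyRange 0 (l + 1) 1)

-- ===== PORT B =====
-- single 'for i in range(top+1)' loop, j solved algebraically
def pvLoopB (n y : Int) : List Int → List Int
  | [] => [-1, -1, -1]
  | i :: is =>
    let r := y - 9000 * i - 1000 * n
    if r ≥ 0 ∧ PySem.Int.mod r 4000 = 0 ∧ PySem.Int.floordiv r 4000 ≤ n - i then
      let j := PySem.Int.floordiv r 4000
      [i, j, n - i - j]
    else pvLoopB n y is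

def Otoshidama_alt (n : Int) (y : Int) : List Int :=
  let top := min (PySem.Int.floordiv y 10000) n
  pvLoopB n y (PySem.List.pyRange 0 (top + 1) 1)

-- ===== PRECONDITION & SPEC =====
def Spec_Otoshidama (n : Int) (y : Int) (out : List Int) : Prop := out = Otoshidama_alt n y
instance (n : Int) (y : Int) (out : List Int) : Decidable (Spec_Otoshidama n y out) := by unfold Spec_Otoshidama; infer_instance

-- ===== CLAIM (what is proved, stated in full; the proofs are below) =====
def Claim_equal_Otoshidama : Prop := ∀ (n : Int) (y : Int), Dom_Otoshidama n y → Spec_Otoshidama n y (Otoshidama n y)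

-- ===== LEMMAS AND PROOFS =====

-- A's inner loop test 'total == y' holds iff 4000*j = r (r = y - 9000*i - 1000*n),
-- i.e. for the single candidate j = r // 4000 when r is divisible by 4000.
theorem pvInnerA_gen (n y i : Int) (js : List Int) :
    pvInnerA n y i js =
      (if PySem.Int.mod (y - 9000 * i - 1000 * n) 4000 = 0 ∧
          PySem.Int.floordiv (y - 9000 * i - 1000 * n) 4000 ∈ js then
        some [i, PySem.Int.floordiv (y - 9000 * i - 1000 * n) 4000,
              n - i - PySem.Int.floordiv (y - 9000 * i - 1000 * n) 4000]
      else none) := by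
  have hm : PySem.Int.mod (y - 9000 * i - 1000 * n) 4000 = (y - 9000 * i - 1000 * n) % 4000 :=
    PySem.Int.mod_eq_emod_of_pos (by norm_num)
  have hd : PySem.Int.floordiv (y - 9000 * i - 1000 * n) 4000 = (y - 9000 * i - 1000 * n) / 4000 :=
    PySem.Int.floordiv_eq_ediv_of_pos (by norm_num)
  induction js with
  | nil => simp [pvInnerA]
  | cons j js ih =>
    have hiff : (10000 * i + 5000 * j + 1000 * (n - i - j) = y) ↔
        (PySem.Int.mod (y - 9000 * i - 1000 * n) 4000 = 0 ∧
         j = PySem.Int.floordiv (y - 9000 * i - 1000 * n) 4000) := by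
      rw [hm, hd]; omega
    simp only [pvInnerA]
    by_cases h1 : 10000 * i + 5000 * j + 1000 * (n - i - j) = y
    · rcases hiff.mp h1 with ⟨h2, h3⟩
      have hmem : PySem.Int.floordiv (y - 9000 * i - 1000 * n) 4000 ∈ j :: js := by
        rw [← h3]; exact List.mem_cons_self
      rw [if_pos h1, if_pos ⟨h2, hmem⟩, h3]
    · rw [if_neg h1, ih]
      have heq : (PySem.Int.mod (y - 9000 * i - 1000 * n) 4000 = 0 ∧
            PySem.Int.floordiv (y - 9000 * i - 1000 * n) 4000 ∈ j :: js) ↔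
          (PySem.Int.mod (y - 9000 * i - 1000 * n) 4000 = 0 ∧
            PySem.Int.floordiv (y - 9000 * i - 1000 * n) 4000 ∈ js) := by
        constructor
        · rintro ⟨h2, h3⟩
          rcases List.mem_cons.mp h3 with h4 | h4
          · exact absurd (hiff.mpr ⟨h2, h4.symm⟩) h1
          · exact ⟨h2, h4⟩
        · rintro ⟨h2, h3⟩; exact ⟨h2, List.mem_cons_of_mem _ h3⟩
      simp only [heq]

-- A's inner scan over [0..n-i] therefore computes exactly B's O(1) algebraic check.
theorem pvInnerA_range (n y i : Int) :
    pvInnerA n y i (PySem.List.pyRange 0 (n - i + 1) 1) =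
      (if (y - 9000 * i - 1000 * n) ≥ 0 ∧ PySem.Int.mod (y - 9000 * i - 1000 * n) 4000 = 0 ∧
          PySem.Int.floordiv (y - 9000 * i - 1000 * n) 4000 ≤ n - i then
        some [i, PySem.Int.floordiv (y - 9000 * i - 1000 * n) 4000,
              n - i - PySem.Int.floordiv (y - 9000 * i - 1000 * n) 4000]
      else none) := by
  rw [pvInnerA_gen]
  have hm : PySem.Int.mod (y - 9000 * i - 1000 * n) 4000 = (y - 9000 * i - 1000 * n) % 4000 :=
    PySem.Int.mod_eq_emod_of_pos (by norm_num)
  have hd : PySem.Int.floordiv (y - 9000 * i - 1000 * n) 4000 = (y - 9000 * i - 1000 * n) / 4000 :=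
    PySem.Int.floordiv_eq_ediv_of_pos (by norm_num)
  have hcond : (PySem.Int.mod (y - 9000 * i - 1000 * n) 4000 = 0 ∧
        PySem.Int.floordiv (y - 9000 * i - 1000 * n) 4000 ∈ PySem.List.pyRange 0 (n - i + 1) 1) ↔
      ((y - 9000 * i - 1000 * n) ≥ 0 ∧ PySem.Int.mod (y - 9000 * i - 1000 * n) 4000 = 0 ∧
        PySem.Int.floordiv (y - 9000 * i - 1000 * n) 4000 ≤ n - i) := by
    rw [PySem.List.mem_pyRange_one, hm, hd]
    omega
  simp only [hcond]

-- step equality => the two loops agree on any common index list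
theorem pvOuterA_eq_loopB (n y : Int) (is : List Int) :
    pvOuterA n y is = pvLoopB n y is := by
  induction is with
  | nil => rfl
  | cons i is ih =>
    simp only [pvOuterA, pvLoopB, pvInnerA_range n y i]
    split_ifs with h
    · rfl
    · exact ih

-- B's check is false for every i > n (r ≥ 0 forces j ≥ 0 > n - i)
theorem pvLoopB_none (n y : Int) (is : List Int) (h : ∀ i ∈ is, n < i) :
    pvLoopB n y is = [-1, -1, -1] := by
  induction is with
  | nil => rfl
  | cons i is ih =>
    have hi : n < i := h i (by simp)
    simp only [pvLoopB]
    split_ifs with hc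
    · exfalso
      obtain ⟨h0, hm, hle⟩ := hc
      rw [PySem.Int.floordiv_eq_ediv_of_pos (by norm_num)] at hle
      have : 0 ≤ (y - 9000 * i - 1000 * n) / 4000 := Int.ediv_nonneg h0 (by norm_num)
      omega
    · exact ih (fun j hj => h j (by simp [hj]))

-- if the suffix finds nothing, pvLoopB over an appended list reduces to the prefix
theorem pvLoopB_append (n y : Int) (xs ys : List Int)
    (h : pvLoopB n y ys = [-1, -1, -1]) :
    pvLoopB n y (xs ++ ys) = pvLoopB n y xs := by
  induction xs with
  | nil => simpa using h
  | cons x xs ih =>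
    simp only [List.cons_append, pvLoopB]
    split_ifs
    · rfl
    · exact ih

theorem Otoshidama_eq (n y : Int) : Otoshidama n y = Otoshidama_alt n y := by
  show pvOuterA n y (PySem.List.pyRange 0 (PySem.Int.floordiv y 10000 + 1) 1)
      = pvLoopB n y (PySem.List.pyRange 0 (min (PySem.Int.floordiv y 10000) n + 1) 1)
  rw [pvOuterA_eq_loopB]
  set l := PySem.Int.floordiv y 10000 with hl
  rcases (by omega : l ≤ n ∨ n < l) with h | h
  · rw [min_eq_left h]
  · rw [min_eq_right h.le]
    rcases (by omega : n + 1 ≤ 0 ∨ (0:Int) < n + 1) with hn | hn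
    · rw [PySem.List.pyRange_one_eq_nil hn]
      rcases (by omega : l + 1 ≤ 0 ∨ (0:Int) < l + 1) with hl0 | hl0
      · rw [PySem.List.pyRange_one_eq_nil hl0]
      · exact pvLoopB_none n y _ (fun i hi => by
          rw [PySem.List.mem_pyRange_one] at hi; omega)
    · rw [PySem.List.pyRange_one_append 0 (n + 1) (l + 1) (by omega) (by omega),
          pvLoopB_append]
      exact pvLoopB_none n y _ (fun i hi => by
        rw [PySem.List.mem_pyRange_one] at hi; omega)

-- ===== VERDICT (by name: the statement is the Claim_ definition above) =====
theorem Otoshidama_spec : Claim_equal_Otoshidama := by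
  intro n y _
  unfold Spec_Otoshidama
  exact Otoshidama_eq n y
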